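-- pv_equiv track=rewrite | github.com/lutetjeff/tile-ip | tests/ref_models/fifo_ref.py | fifo_ref
-- ===== SOURCE A (Python) =====
-- def fifo_ref(inputs, ready_pattern, depth):
--     """Simulate FIFO behavior cycle by cycle.
--
--     Args:
--         inputs (list): List of integer input data values (one per cycle).
--         ready_pattern (list): List of ready_in values (0 or 1) per cycle.
--         depth (int): FIFO depth.
--
--     Returns:
--         list: List of (data_out, valid_out, ready_out) tuples per cycle.
--     """
--     fifo = []
--     trace = []
--
--     for data, ready in zip(inputs, ready_pattern):
--         valid_out = 1 if fifo else 0
--         ready_out = 1 if len(fifo) < depth else 0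
--
--         write_en = 1 and ready_out
--         read_en = valid_out and ready
--
--         data_out = fifo[0] if fifo else 0
--
--         trace.append((data_out, valid_out, ready_out))
--
--         if write_en:
--             fifo.append(data)
--         if read_en:
--             fifo.pop(0)
--
--     return trace
-- ===== SOURCE B (Python) =====
-- def fifo_ref(inputs, ready_pattern, depth):
--     """Two-pass FIFO reference: pass 1 derives all control signals from an
--     occupancy counter only; pass 2 replays the datapath with a write list and
--     a read pointer (no queue pops)."""
--     # pass 1: control signals from the occupancy count
--     count = 0
--     sigs = []  # (valid_out, ready_out, write_en, read_en) per cycle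
--     for _, ready in zip(inputs, ready_pattern):
--         v = 1 if count > 0 else 0
--         ro = 1 if count < depth else 0
--         w = ro
--         r = 1 if (count > 0 and ready != 0) else 0
--         sigs.append((v, ro, w, r))
--         count += w - r
--     # pass 2: datapath replay; the queue front is written[rp]
--     written = []
--     rp = 0
--     trace = []
--     for data, (v, ro, w, r) in zip(inputs, sigs):
--         data_out = written[rp] if rp < len(written) else 0
--         trace.append((data_out, v, ro))
--         if w:
--             written.append(data)
--         if r:
--             rp += 1
--     return trace
-- ===== Notes on version B (the rewrite author's own statement) =====
-- stated objective: alternative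
-- what changed: Replaces the single simulate-as-you-go loop with two differently-shaped passes: a control pass over an integer occupancy counter that precomputes valid/ready/write/read per cycle, and a datapath pass that replays values with an append-only write list and a read pointer instead of popping a queue.
import Mathlib
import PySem

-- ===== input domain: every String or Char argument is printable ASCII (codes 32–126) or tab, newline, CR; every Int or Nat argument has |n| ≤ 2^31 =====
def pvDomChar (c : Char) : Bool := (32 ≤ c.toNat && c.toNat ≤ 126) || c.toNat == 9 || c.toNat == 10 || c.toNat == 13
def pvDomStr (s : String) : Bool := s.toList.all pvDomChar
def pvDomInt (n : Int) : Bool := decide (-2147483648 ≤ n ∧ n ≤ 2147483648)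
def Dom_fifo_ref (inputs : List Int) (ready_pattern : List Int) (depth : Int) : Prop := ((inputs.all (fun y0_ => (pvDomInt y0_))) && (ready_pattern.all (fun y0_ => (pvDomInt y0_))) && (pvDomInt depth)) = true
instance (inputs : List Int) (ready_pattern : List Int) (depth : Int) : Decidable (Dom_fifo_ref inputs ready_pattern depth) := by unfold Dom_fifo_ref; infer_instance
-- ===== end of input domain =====

-- B replaces A's single simulate-as-you-go loop by a control-signal pass over
-- an occupancy counter plus a datapath replay with a read pointer (alternative decomposition).


-- ===== PORT A =====
-- loop body of A: state = (fifo, trace), one cycle per (data, ready) pair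
def stepA (depth : Int) (s : List Int × List (Int × Int × Int)) (p : Int × Int) :
    List Int × List (Int × Int × Int) :=
  let fifo := s.1
  let valid_out : Int := if fifo ≠ [] then 1 else 0
  let ready_out : Int := if (fifo.length : Int) < depth then 1 else 0
  let write_en : Int := ready_out              -- `1 and ready_out`
  let read_en : Int := if valid_out ≠ 0 then p.2 else valid_out  -- `valid_out and ready`
  let data_out : Int := fifo.headD 0           -- fifo[0] if fifo else 0
  let trace' := s.2 ++ [(data_out, valid_out, ready_out)]
  let fifo1 := if write_en ≠ 0 then fifo ++ [p.1] else fifo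
  let fifo2 := if read_en ≠ 0 then fifo1.drop 1 else fifo1  -- pop(0); fifo1 nonempty here
  (fifo2, trace')

def fifo_ref (inputs : List Int) (ready_pattern : List Int) (depth : Int) : List (Int × Int × Int) :=
  ((inputs.zip ready_pattern).foldl (stepA depth) ([], [])).2

-- ===== PORT B =====
-- pass 1 body: state = (count, sigs); records (valid_out, ready_out, write_en, read_en)
def stepB1 (depth : Int) (s : Int × List (Int × Int × Int × Int)) (p : Int × Int) :
    Int × List (Int × Int × Int × Int) :=
  let count := s.1
  let v : Int := if count > 0 then 1 else 0
  let ro : Int := if count < depth then 1 else 0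
  let w : Int := ro
  let r : Int := if count > 0 ∧ p.2 ≠ 0 then 1 else 0
  (count + w - r, s.2 ++ [(v, ro, w, r)])

-- pass 2 body: state = (written, rp, trace); replays the datapath with a read pointer
def stepB2 (s : List Int × Nat × List (Int × Int × Int)) (p : Int × (Int × Int × Int × Int)) :
    List Int × Nat × List (Int × Int × Int) :=
  let written := s.1
  let rp := s.2.1
  let data_out : Int := written.getD rp 0      -- written[rp] if rp < len(written) else 0
  let trace' := s.2.2 ++ [(data_out, p.2.1, p.2.2.1)]
  let written' := if p.2.2.2.1 ≠ 0 then written ++ [p.1] else written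
  let rp' := if p.2.2.2.2 ≠ 0 then rp + 1 else rp
  (written', rp', trace')

def fifo_ref_alt (inputs : List Int) (ready_pattern : List Int) (depth : Int) : List (Int × Int × Int) :=
  let sigs := ((inputs.zip ready_pattern).foldl (stepB1 depth) (0, [])).2
  ((inputs.zip sigs).foldl stepB2 ([], 0, [])).2.2

-- ===== PRECONDITION & SPEC =====
def Spec_fifo_ref (inputs : List Int) (ready_pattern : List Int) (depth : Int) (out : List (Int × Int × Int)) : Prop := out = fifo_ref_alt inputs ready_pattern depth
instance (inputs : List Int) (ready_pattern : List Int) (depth : Int) (out : List (Int × Int × Int)) : Decidable (Spec_fifo_ref inputs ready_pattern depth out) := by unfold Spec_fifo_ref; infer_instance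

-- ===== CLAIM (what is proved, stated in full; the proofs are below) =====
def Claim_equal_fifo_ref : Prop := ∀ (inputs : List Int) (ready_pattern : List Int) (depth : Int), Dom_fifo_ref inputs ready_pattern depth → Spec_fifo_ref inputs ready_pattern depth (fifo_ref inputs ready_pattern depth)

-- ===== LEMMAS AND PROOFS =====

-- recursive characterisation of A's trace
def aTrace (depth : Int) : List Int → List (Int × Int) → List (Int × Int × Int)
  | _, [] => []
  | fifo, (d, ry) :: rest =>
    let v : Int := if fifo ≠ [] then 1 else 0
    let ro : Int := if (fifo.length : Int) < depth then 1 else 0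
    let re : Int := if v ≠ 0 then ry else v
    let f1 := if ro ≠ 0 then fifo ++ [d] else fifo
    let f2 := if re ≠ 0 then f1.drop 1 else f1
    (fifo.headD 0, v, ro) :: aTrace depth f2 rest

-- recursive characterisations of B's two passes
def bSigs (depth : Int) : Int → List (Int × Int) → List (Int × Int × Int × Int)
  | _, [] => []
  | count, (_, ry) :: rest =>
    let v : Int := if count > 0 then 1 else 0
    let ro : Int := if count < depth then 1 else 0
    let r : Int := if count > 0 ∧ ry ≠ 0 then 1 else 0
    (v, ro, ro, r) :: bSigs depth (count + ro - r) rest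

def bTrace : List Int → Nat → List (Int × (Int × Int × Int × Int)) → List (Int × Int × Int)
  | _, _, [] => []
  | written, rp, (d, (v, ro, w, r)) :: rest =>
    (written.getD rp 0, v, ro) ::
      bTrace (if w ≠ 0 then written ++ [d] else written) (if r ≠ 0 then rp + 1 else rp) rest

theorem foldA_eq (depth : Int) :
    ∀ (l : List (Int × Int)) (fifo : List Int) (acc : List (Int × Int × Int)),
      (l.foldl (stepA depth) (fifo, acc)).2 = acc ++ aTrace depth fifo l := by
  intro l
  induction l with
  | nil => intro fifo acc; simp [aTrace]
  | cons p rest ih =>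
    intro fifo acc
    obtain ⟨d, ry⟩ := p
    simp only [List.foldl_cons, stepA, aTrace, ih]
    simp

theorem foldB1_eq (depth : Int) :
    ∀ (l : List (Int × Int)) (c : Int) (acc : List (Int × Int × Int × Int)),
      (l.foldl (stepB1 depth) (c, acc)).2 = acc ++ bSigs depth c l := by
  intro l
  induction l with
  | nil => intro c acc; simp [bSigs]
  | cons p rest ih =>
    intro c acc
    obtain ⟨d, ry⟩ := p
    simp only [List.foldl_cons, stepB1, bSigs, ih]
    simp

theorem foldB2_eq :
    ∀ (l : List (Int × (Int × Int × Int × Int))) (written : List Int) (rp : Nat)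
      (acc : List (Int × Int × Int)),
      (l.foldl stepB2 (written, rp, acc)).2.2 = acc ++ bTrace written rp l := by
  intro l
  induction l with
  | nil => intro w rp acc; simp [bTrace]
  | cons p rest ih =>
    intro w rp acc
    obtain ⟨d, v, ro, we, re⟩ := p
    simp only [List.foldl_cons, stepB2, bTrace, ih]
    simp

theorem bSigs_length (depth : Int) :
    ∀ (l : List (Int × Int)) (c : Int), (bSigs depth c l).length = l.length := by
  intro l
  induction l with
  | nil => intro c; simp [bSigs]
  | cons p rest ih => intro c; obtain ⟨d, ry⟩ := p; simp [bSigs, ih]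

theorem zip_map_fst {β : Type} :
    ∀ (xs ys : List Int) (sigs : List β),
      sigs.length = (xs.zip ys).length →
      xs.zip sigs = ((xs.zip ys).map Prod.fst).zip sigs := by
  intro xs
  induction xs with
  | nil => intro ys sigs h; simp
  | cons x xt ih =>
    intro ys sigs h
    cases ys with
    | nil =>
      simp only [List.zip_nil_right, List.length_nil] at h
      rw [List.length_eq_zero_iff] at h
      simp [h]
    | cons y yt =>
      cases sigs with
      | nil => simp at h
      | cons s st =>
        simp only [List.zip_cons_cons, List.length_cons, add_left_inj] at h
        simp only [List.zip_cons_cons, List.map_cons]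
        rw [ih yt st h]

theorem main_eq (depth : Int) :
    ∀ (l : List (Int × Int)) (written : List Int) (rp : Nat), rp ≤ written.length →
      aTrace depth (written.drop rp) l =
        bTrace written rp ((l.map Prod.fst).zip (bSigs depth ((written.length : Int) - rp) l)) := by
  intro l
  induction l with
  | nil => intro w rp h; simp [aTrace, bSigs, bTrace]
  | cons p rest ih =>
    intro written rp hle
    obtain ⟨d, ry⟩ := p
    have hnil : (List.drop rp written ≠ []) ↔ rp < written.length := by
      rw [ne_eq, List.drop_eq_nil_iff]; omega
    have hlen : ((List.drop rp written).length : Int) = (written.length : Int) - rp := by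
      rw [List.length_drop]; omega
    have hhead : (List.drop rp written).headD 0 = written.getD rp 0 := by
      simp [List.headD_eq_head?_getD, List.getD_eq_getElem?_getD, List.head?_drop]
    simp only [aTrace, bSigs, List.map_cons, List.zip_cons_cons, bTrace]
    by_cases hrp : rp < written.length
    · have hv : List.drop rp written ≠ [] := hnil.mpr hrp
      have hc : (0:Int) < (written.length : Int) - rp := by omega
      by_cases hdep : ((written.length : Int) - rp) < depth
      · have hro : ((List.drop rp written).length : Int) < depth := by rw [hlen]; exact hdep
        by_cases hr : ry = 0
        · -- valid, write, no read
          simp only [if_pos hv, if_pos hro, if_pos hc, if_pos hdep, hr]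
          norm_num
          have key := ih (written ++ [d]) rp (by simp; omega)
          rw [List.drop_append_of_le_length hle] at key
          have ec : (((written ++ [d]).length : Nat) : Int) - (rp : Int)
              = (written.length : Int) - rp + 1 := by simp; omega
          rw [ec] at key
          exact key
        · -- valid, write, read
          simp only [if_pos hv, if_pos hro, if_pos hc, if_pos hdep,
            if_pos (And.intro hc hr)]
          norm_num [hr]
          have key := ih (written ++ [d]) (rp + 1) (by simp; omega)
          have ed : (List.drop rp written ++ [d]).tail = List.drop (rp + 1) (written ++ [d]) := by
            rw [← List.drop_one, ← List.drop_append_of_le_length hle, List.drop_drop]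
          rw [← ed] at key
          have ec : (((written ++ [d]).length : Nat) : Int) - ((rp + 1 : Nat) : Int)
              = (written.length : Int) - rp := by simp
          rw [ec] at key
          exact key
      · have hro : ¬ ((List.drop rp written).length : Int) < depth := by rw [hlen]; exact hdep
        by_cases hr : ry = 0
        · -- valid, no write, no read
          simp only [if_pos hv, if_neg hro, if_pos hc, if_neg hdep, hr]
          norm_num
          exact ih written rp hle
        · -- valid, no write, read
          simp only [if_pos hv, if_neg hro, if_pos hc, if_neg hdep,
            if_pos (And.intro hc hr)]
          norm_num [hr]
          have key := ih written (rp + 1) (by omega)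
          have ec : (written.length : Int) - ((rp + 1 : Nat) : Int)
              = (written.length : Int) - rp - 1 := by push_cast; ring
          rw [ec] at key
          exact key
    · have hv : ¬ List.drop rp written ≠ [] := by rw [hnil]; exact hrp
      have hc : ¬ (0:Int) < (written.length : Int) - rp := by omega
      by_cases hdep : ((written.length : Int) - rp) < depth
      · have hro : ((List.drop rp written).length : Int) < depth := by rw [hlen]; exact hdep
        -- invalid, write
        simp only [if_neg hv, if_pos hro, if_neg hc, if_pos hdep]
        norm_num [hrp]
        have key := ih (written ++ [d]) rp (by simp; omega)
        rw [List.drop_append_of_le_length hle] at key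
        have ec : (((written ++ [d]).length : Nat) : Int) - (rp : Int)
            = (written.length : Int) - rp + 1 := by simp; omega
        rw [ec] at key
        exact key
      · have hro : ¬ ((List.drop rp written).length : Int) < depth := by rw [hlen]; exact hdep
        -- invalid, no write
        simp only [if_neg hv, if_neg hro, if_neg hc, if_neg hdep]
        norm_num [hrp]
        exact ih written rp hle

-- ===== VERDICT (by name: the statement is the Claim_ definition above) =====
theorem fifo_ref_spec : Claim_equal_fifo_ref := by
  intro inputs ready_pattern depth _
  unfold Spec_fifo_ref fifo_ref fifo_ref_alt
  rw [foldA_eq, foldB1_eq, foldB2_eq]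
  simp only [List.nil_append]
  have hz : inputs.zip (bSigs depth 0 (inputs.zip ready_pattern)) =
      ((inputs.zip ready_pattern).map Prod.fst).zip (bSigs depth 0 (inputs.zip ready_pattern)) :=
    zip_map_fst inputs ready_pattern _ (bSigs_length depth _ 0)
  rw [hz]
  have := main_eq depth (inputs.zip ready_pattern) [] 0 (by simp)
  simpa using this
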